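-- pv_equiv track=rewrite | github.com/ogawa3427/microlife | lifegame.py | ume
-- ===== SOURCE A (Python) =====
-- def ume(sta):
--     vsta = "00000000"
--     for i, char in enumerate(sta):
--         vsta += char
--         if i % 5 == 4:
--             vsta += "00"
--     vsta += "000000"
--     return vsta
-- ===== SOURCE B (Python) =====
-- def ume(sta):
--     parts = ["00000000"]
--     i = 0
--     while i + 5 <= len(sta):
--         parts.append(sta[i:i+5])
--         parts.append("00")
--         i += 5
--     parts.append(sta[i:])
--     parts.append("000000")
--     return "".join(parts)
-- ===== Notes on version B (the rewrite author's own statement) =====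
-- stated objective: faster
-- what changed: Replaces the character-by-character enumerate loop with an index-mod-5 test by a stride-5 loop that slices whole 5-character blocks and joins them with zero-pair separators once at the end.
import Mathlib
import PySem

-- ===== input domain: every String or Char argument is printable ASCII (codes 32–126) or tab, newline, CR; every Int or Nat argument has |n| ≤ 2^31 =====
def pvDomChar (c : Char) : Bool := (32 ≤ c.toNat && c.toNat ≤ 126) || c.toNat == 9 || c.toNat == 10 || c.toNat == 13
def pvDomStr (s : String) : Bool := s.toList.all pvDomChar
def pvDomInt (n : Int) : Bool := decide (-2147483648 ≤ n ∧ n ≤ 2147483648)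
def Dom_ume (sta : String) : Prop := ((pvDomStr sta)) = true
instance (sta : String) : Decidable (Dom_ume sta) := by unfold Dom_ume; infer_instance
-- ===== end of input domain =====

-- B replaces A's per-character enumerate loop (with an i % 5 == 4 test) by a recursion that
-- slices whole 5-character blocks and inserts "00" between them; same result, simpler shape.

-- ===== PORT A =====
-- hand port of `for i, char in enumerate(sta): vsta += char; if i % 5 == 4: vsta += "00"`:
-- the obvious index-carrying recursion over the same accumulator (exact: enumerate indices are 0,1,2,…)
def umeLoop (vsta : List Char) (i : Nat) (l : List Char) : List Char :=
  match l with
  | [] => vsta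
  | c :: rest =>
    let v := vsta ++ [c]
    umeLoop (if i % 5 = 4 then v ++ ['0', '0'] else v) (i + 1) rest

def ume (sta : String) : String :=
  let vsta := umeLoop ['0','0','0','0','0','0','0','0'] 0 sta.toList
  String.mk (vsta ++ ['0','0','0','0','0','0'])

-- ===== PORT B =====
-- port of Source B's inner `body`: slice off 5 chars at a time, "00" between blocks
def umeBody (s : List Char) : List Char :=
  if h : 5 ≤ s.length then
    s.take 5 ++ ['0', '0'] ++ umeBody (s.drop 5)
  else s
termination_by s.length
decreasing_by simp; omega

def ume_alt (sta : String) : String :=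
  String.mk (['0','0','0','0','0','0','0','0'] ++ umeBody sta.toList ++ ['0','0','0','0','0','0'])

-- ===== PRECONDITION & SPEC =====
def Spec_ume (sta : String) (out : String) : Prop := out = ume_alt sta
instance (sta : String) (out : String) : Decidable (Spec_ume sta out) := by unfold Spec_ume; infer_instance

-- ===== CLAIM (what is proved, stated in full; the proofs are below) =====
def Claim_equal_ume : Prop := ∀ (sta : String), Dom_ume sta → Spec_ume sta (ume sta)

-- ===== LEMMAS AND PROOFS =====

-- loop invariant: starting at any index n ≡ 0 (mod 5), A's loop appends exactly B's block string
theorem umeLoop_eq (l : List Char) (n : Nat) (v : List Char) (h : n % 5 = 0) :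
    umeLoop v n l = v ++ umeBody l := by
  match l with
  | [] =>
    rw [umeBody]
    simp [umeLoop]
  | [a] =>
    rw [umeBody]
    have h1 : ¬ (n % 5 = 4) := by omega
    simp [umeLoop, h1]
  | [a, b] =>
    rw [umeBody]
    have h1 : ¬ (n % 5 = 4) := by omega
    have h2 : ¬ ((n + 1) % 5 = 4) := by omega
    simp [umeLoop, h1, h2]
  | [a, b, c] =>
    rw [umeBody]
    have h1 : ¬ (n % 5 = 4) := by omega
    have h2 : ¬ ((n + 1) % 5 = 4) := by omega
    have h3 : ¬ ((n + 1 + 1) % 5 = 4) := by omega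
    simp [umeLoop, h1, h2, h3]
  | [a, b, c, d] =>
    rw [umeBody]
    have h1 : ¬ (n % 5 = 4) := by omega
    have h2 : ¬ ((n + 1) % 5 = 4) := by omega
    have h3 : ¬ ((n + 1 + 1) % 5 = 4) := by omega
    have h4 : ¬ ((n + 1 + 1 + 1) % 5 = 4) := by omega
    simp [umeLoop, h1, h2, h3, h4]
  | a :: b :: c :: d :: e :: rest =>
    have h1 : ¬ (n % 5 = 4) := by omega
    have h2 : ¬ ((n + 1) % 5 = 4) := by omega
    have h3 : ¬ ((n + 1 + 1) % 5 = 4) := by omega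
    have h4 : ¬ ((n + 1 + 1 + 1) % 5 = 4) := by omega
    have h5 : (n + 1 + 1 + 1 + 1) % 5 = 4 := by omega
    have ih := umeLoop_eq rest (n + 5) (v ++ [a] ++ [b] ++ [c] ++ [d] ++ [e] ++ ['0', '0']) (by omega)
    rw [umeBody]
    have hlen : 5 ≤ (a :: b :: c :: d :: e :: rest).length := by simp
    simp only [hlen, dif_pos]
    simp only [umeLoop, if_neg h1, if_neg h2, if_neg h3, if_neg h4, if_pos h5]
    have h15 : n + 1 + 1 + 1 + 1 + 1 = n + 5 := by omega
    rw [h15, ih]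
    simp
termination_by l.length
decreasing_by simp; omega

-- ===== VERDICT (by name: the statement is the Claim_ definition above) =====
theorem ume_spec : Claim_equal_ume := by
  intro sta _
  unfold Spec_ume ume ume_alt
  rw [umeLoop_eq _ 0 _ rfl]
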